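-- pv_equiv track=rewrite | github.com/Rango-bit/Adolescent-mental-health | my_datasets/get_tokenized_dataset.py | build_position_ids
-- ===== SOURCE A (Python) =====
-- def build_position_ids(example_ids):
--
--     assert isinstance(
--         example_ids, list
--     ), f"expected list of example_ids, got type {type(example_ids)}"
--
--     position_ids = []
--     current_id = None
--     pos = 0
--
--     for sid in example_ids:
--         if sid != current_id:
--             current_id = sid
--             pos = 0
--         position_ids.append(pos)
--         pos += 1
--
--     return position_ids
-- ===== SOURCE B (Python) =====
-- def build_position_ids(example_ids):
--
--     assert isinstance(
--         example_ids, list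
--     ), f"expected list of example_ids, got type {type(example_ids)}"
--
--     position_ids = []
--     i, n = 0, len(example_ids)
--     while i < n:
--         j = i + 1
--         while j < n and example_ids[j] == example_ids[i]:
--             j += 1
--         position_ids.extend(range(j - i))
--         i = j
--     return position_ids
-- ===== Notes on version B (the rewrite author's own statement) =====
-- stated objective: alternative
-- what changed: Replaces the running current_id/pos counter with run-segmentation: find each maximal run of equal ids and emit range(run_length) per run.
import Mathlib
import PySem

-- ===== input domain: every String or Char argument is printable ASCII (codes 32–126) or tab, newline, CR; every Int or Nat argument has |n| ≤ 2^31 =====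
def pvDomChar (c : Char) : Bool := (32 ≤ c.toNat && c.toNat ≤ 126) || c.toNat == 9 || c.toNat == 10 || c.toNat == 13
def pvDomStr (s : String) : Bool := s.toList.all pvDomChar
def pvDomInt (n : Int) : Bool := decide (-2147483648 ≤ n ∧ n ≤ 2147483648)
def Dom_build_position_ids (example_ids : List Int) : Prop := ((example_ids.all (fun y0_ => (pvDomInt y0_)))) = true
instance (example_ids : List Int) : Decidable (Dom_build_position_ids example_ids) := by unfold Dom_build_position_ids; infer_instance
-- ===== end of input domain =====

-- B differs from A by run-segmentation (one `range` per maximal run of equal ids) instead of a running counter; same cost.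

-- ===== PORT A =====
-- the for-loop of A over (position_ids, current_id, pos); current_id starts as None (Option Int)
def pvBuildLoopA (xs : List Int) (acc : List Int) (cur : Option Int) (pos : Int) : List Int :=
  match xs with
  | [] => acc
  | sid :: rest =>
    if some sid ≠ cur then pvBuildLoopA rest (acc ++ [0]) (some sid) 1
    else pvBuildLoopA rest (acc ++ [pos]) cur (pos + 1)

def build_position_ids (example_ids : List Int) : List Int :=
  pvBuildLoopA example_ids [] none 0

-- ===== PORT B =====
-- the inner counting loop of B: length k of the leading run of `tail` equal to `head`
def pvRunLen (tail : List Int) (head : Int) : Nat :=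
  match tail with
  | [] => 0
  | y :: ys => if y == head then 1 + pvRunLen ys head else 0

-- the outer while-loop of B over `rest`; `extend(range(1+k))` appends 0,…,k as Ints
def pvBuildLoopB (rest : List Int) : List Int :=
  match rest with
  | [] => []
  | head :: tail =>
    let k := pvRunLen tail head
    ((List.range (1 + k)).map (fun (i : Nat) => (i : Int))) ++ pvBuildLoopB (tail.drop k)
termination_by rest.length
decreasing_by
  simp only [List.length_cons, List.length_drop]
  omega

def build_position_ids_alt (example_ids : List Int) : List Int :=
  pvBuildLoopB example_ids

-- ===== PRECONDITION & SPEC =====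
def Spec_build_position_ids (example_ids : List Int) (out : List Int) : Prop := out = build_position_ids_alt example_ids
instance (example_ids : List Int) (out : List Int) : Decidable (Spec_build_position_ids example_ids out) := by unfold Spec_build_position_ids; infer_instance

-- ===== CLAIM (what is proved, stated in full; the proofs are below) =====
def Claim_equal_build_position_ids : Prop := ∀ (example_ids : List Int), Dom_build_position_ids example_ids → Spec_build_position_ids example_ids (build_position_ids example_ids)

-- ===== LEMMAS AND PROOFS =====

theorem pvBuildLoopA_acc (xs : List Int) (acc : List Int) (cur : Option Int) (pos : Int) :
    pvBuildLoopA xs acc cur pos = acc ++ pvBuildLoopA xs [] cur pos := by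
  induction xs generalizing acc cur pos with
  | nil => simp [pvBuildLoopA]
  | cons sid rest ih =>
    simp only [pvBuildLoopA, List.nil_append]
    split
    · rw [ih (acc ++ [0]), ih [0]]; simp
    · rw [ih (acc ++ [pos]), ih [pos]]; simp

theorem pvRangeMapShift (p : Int) (k : Nat) :
    (List.range (1 + k)).map (fun (i : Nat) => p + (i : Int)) =
      p :: (List.range k).map (fun (i : Nat) => (p + 1) + (i : Int)) := by
  rw [Nat.add_comm 1 k, List.range_succ_eq_map, List.map_cons, List.map_map]
  refine congrArg₂ _ (by simp) ?_
  apply List.map_congr_left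
  intro i _
  simp only [Function.comp]
  push_cast
  ring

theorem pvRangeCast (k : Nat) :
    (List.range (1 + k)).map (fun (i : Nat) => (i : Int)) =
      0 :: (List.range k).map (fun (i : Nat) => (1 : Int) + (i : Int)) := by
  have h := pvRangeMapShift 0 k
  simpa using h

-- loop invariant: with current_id = some c and counter p, A's loop finishes the current run
-- (positions p, p+1, …) and then behaves like B's run-segmentation
theorem pvBuildLoopA_run (xs : List Int) (c : Int) (p : Int) :
    pvBuildLoopA xs [] (some c) p =
      ((List.range (pvRunLen xs c)).map (fun (i : Nat) => p + (i : Int))) ++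
        pvBuildLoopB (xs.drop (pvRunLen xs c)) := by
  induction xs generalizing c p with
  | nil => simp [pvBuildLoopA, pvBuildLoopB, pvRunLen]
  | cons sid rest ih =>
    by_cases h : sid = c
    · subst h
      have hcond : ¬ (some sid ≠ some sid) := by simp
      simp only [pvBuildLoopA, if_neg hcond, List.nil_append]
      rw [pvBuildLoopA_acc, ih sid (p + 1)]
      simp only [pvRunLen, if_pos (by simp : (sid == sid) = true)]
      rw [pvRangeMapShift p (pvRunLen rest sid)]
      rw [Nat.add_comm 1 (pvRunLen rest sid), List.drop_succ_cons]
      simp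
    · have hcond : some sid ≠ some c := by simp [h]
      simp only [pvBuildLoopA, if_pos hcond, List.nil_append]
      rw [pvBuildLoopA_acc, ih sid 1]
      have hr : pvRunLen (sid :: rest) c = 0 := by
        simp [pvRunLen, h]
      rw [hr]
      simp only [List.range_zero, List.map_nil, List.nil_append, List.drop_zero]
      rw [pvBuildLoopB]
      rw [pvRangeCast (pvRunLen rest sid)]
      simp

-- ===== VERDICT (by name: the statement is the Claim_ definition above) =====
theorem build_position_ids_spec : Claim_equal_build_position_ids := by
  intro xs _
  unfold Spec_build_position_ids build_position_ids build_position_ids_alt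
  cases xs with
  | nil => simp [pvBuildLoopA, pvBuildLoopB]
  | cons sid rest =>
    simp only [pvBuildLoopA, if_pos (by simp : some sid ≠ (none : Option Int)), List.nil_append]
    rw [pvBuildLoopA_acc, pvBuildLoopA_run rest sid 1]
    rw [pvBuildLoopB]
    rw [pvRangeCast (pvRunLen rest sid)]
    simp
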